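-- pv_equiv track=rewrite | github.com/miguelangelhuamani/GreenStackAI | benchmark_tasks.py | slow_version
-- ===== SOURCE A (Python) =====
-- def slow_version(input_data):
--     duplicates = []
--     for primary_index in range(len(input_data)):
--         for search_index in range(primary_index + 1, len(input_data)):
--             current_item = input_data[primary_index]
--             if current_item == input_data[search_index] and current_item not in duplicates:
--                 duplicates.append(current_item)
--     return duplicates
-- ===== SOURCE B (Python) =====
-- def slow_version(input_data):
--     counts = {}
--     for item in input_data:
--         counts[item] = counts.get(item, 0) + 1
--     seen = set()
--     result = []
--     for item in input_data:
--         if counts.get(item, 0) > 1 and item not in seen: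
--             seen.add(item)
--             result.append(item)
--     return result
-- ===== Notes on version B (the rewrite author's own statement) =====
-- stated objective: faster
-- what changed: replaced the nested pairwise index scan by one pass building a frequency dict followed by one in-order pass emitting each not-yet-seen value whose count exceeds 1
import Mathlib
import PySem

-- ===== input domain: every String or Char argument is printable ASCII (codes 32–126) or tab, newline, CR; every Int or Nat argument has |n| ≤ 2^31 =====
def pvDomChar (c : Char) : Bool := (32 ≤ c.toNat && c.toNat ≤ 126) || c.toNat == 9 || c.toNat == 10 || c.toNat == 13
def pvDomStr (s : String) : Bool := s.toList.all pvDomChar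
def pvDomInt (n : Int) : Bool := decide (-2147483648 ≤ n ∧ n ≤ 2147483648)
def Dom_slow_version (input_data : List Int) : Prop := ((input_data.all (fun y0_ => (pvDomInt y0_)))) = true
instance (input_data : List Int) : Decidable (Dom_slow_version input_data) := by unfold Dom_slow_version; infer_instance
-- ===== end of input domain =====

-- B replaces A's quadratic nested index scan by a frequency-dict pass plus one in-order emit pass (asymptotically faster).


-- ===== PORT A =====
def slow_version (input_data : List Int) : List Int :=
  (PySem.List.pyRange 0 (PySem.List.len input_data)).foldl
    (fun duplicates primary_index =>
      (PySem.List.pyRange (primary_index + 1) (PySem.List.len input_data)).foldl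
        (fun duplicates search_index =>
          let current_item := PySem.List.pyGetD input_data primary_index 0
          if current_item == PySem.List.pyGetD input_data search_index 0
              && !(duplicates.contains current_item)
          then duplicates ++ [current_item] else duplicates)
        duplicates)
    []

-- ===== PORT B =====
def slow_version_alt (input_data : List Int) : List Int :=
  let counts : PySem.Dict Int Int :=
    input_data.foldl (fun d item => d.modify item 0 (fun c => c + 1)) PySem.Dict.empty
  let p :=
    input_data.foldl
      (fun (p : PySem.Set Int × List Int) item =>
        if 1 < counts.getD item 0 && !(PySem.Set.contains p.1 item)
        then (PySem.Set.add p.1 item, p.2 ++ [item]) else p)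
      (PySem.Set.empty, [])
  p.2

-- ===== PRECONDITION & SPEC =====
def Spec_slow_version (input_data : List Int) (out : List Int) : Prop := out = slow_version_alt input_data
instance (input_data : List Int) (out : List Int) : Decidable (Spec_slow_version input_data out) := by unfold Spec_slow_version; infer_instance

-- ===== CLAIM (what is proved, stated in full; the proofs are below) =====
def Claim_equal_slow_version : Prop := ∀ (input_data : List Int), Dom_slow_version input_data → Spec_slow_version input_data (slow_version input_data)

-- ===== LEMMAS AND PROOFS =====

/-- Common reference recursion: walk the list, emitting each element that recurs later
and has not been emitted yet. -/
def dupRec : List Int → List Int → List Int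
  | dups, [] => dups
  | dups, x :: rest => dupRec (if x ∈ rest ∧ ¬ x ∈ dups then dups ++ [x] else dups) rest

/-- A's inner loop over the tail, folded over the elements. -/
lemma inner_eq (x : Int) (l : List Int) (d : List Int) :
    l.foldl (fun d y => if x == y && !(d.contains x) then d ++ [x] else d) d
      = if x ∈ l ∧ ¬ x ∈ d then d ++ [x] else d := by
  induction l generalizing d with
  | nil => simp
  | cons y l ih =>
    simp only [List.foldl_cons, ih]
    by_cases hxy : x = y
    · subst hxy
      by_cases hd : x ∈ d
      · simp [hd]
      · simp [hd]
    · by_cases hd : x ∈ d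
      · simp [hd, hxy]
      · simp [hd, hxy]

/-- A's outer loop from index `k` equals `dupRec` on the remaining suffix. -/
lemma outer_eq (xs : List Int) :
    ∀ (l : List Int) (k : Nat) (dups : List Int), xs.drop k = l →
    (PySem.List.pyRange (↑k) (PySem.List.len xs)).foldl
      (fun duplicates primary_index =>
        (PySem.List.pyRange (primary_index + 1) (PySem.List.len xs)).foldl
          (fun duplicates search_index =>
            let current_item := PySem.List.pyGetD xs primary_index 0
            if current_item == PySem.List.pyGetD xs search_index 0
                && !(duplicates.contains current_item)
            then duplicates ++ [current_item] else duplicates)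
          duplicates)
      dups
      = dupRec dups l := by
  intro l
  induction l with
  | nil =>
    intro k dups h
    have hk : xs.length ≤ k := by
      have := List.drop_eq_nil_iff.mp h
      omega
    have hnil : PySem.List.pyRange (↑k) (PySem.List.len xs) = [] :=
      PySem.List.pyRange_one_eq_nil (by simp [PySem.List.len]; exact_mod_cast hk)
    rw [hnil]
    rfl
  | cons x rest ih =>
    intro k dups h
    have hk : k < xs.length := by
      by_contra hk
      rw [List.drop_eq_nil_iff.mpr (by omega)] at h
      simp at h
    have hx : PySem.List.pyGetD xs (↑k) 0 = x := by
      rw [PySem.List.pyGetD_natCast]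
      have h1 : xs[k]? = some x := by
        rw [← List.head?_drop, h]; rfl
      simp [List.getD, h1]
    have hdrop : xs.drop (k + 1) = rest := by
      have h1 := congrArg (List.drop 1) h
      rw [List.drop_drop] at h1
      simpa [Nat.add_comm] using h1
    rw [PySem.List.pyRange_one_cons (by simp [PySem.List.len]; exact_mod_cast hk)]
    simp only [List.foldl_cons]
    have hcast : (↑k + 1 : Int) = ((k+1 : Nat) : Int) := by push_cast; ring
    rw [hcast]
    -- reduce the inner loop
    have hinner : ∀ d : List Int,
        (PySem.List.pyRange (↑(k+1)) (PySem.List.len xs)).foldl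
          (fun duplicates search_index =>
            let current_item := PySem.List.pyGetD xs (↑k) 0
            if current_item == PySem.List.pyGetD xs search_index 0
                && !(duplicates.contains current_item)
            then duplicates ++ [current_item] else duplicates)
          d
        = if x ∈ rest ∧ ¬ x ∈ d then d ++ [x] else d := by
      intro d
      simp only [hx]
      rw [PySem.List.foldl_pyRange_pyGetD xs 0
        (fun acc y => if x == y && !(acc.contains x) then acc ++ [x] else acc) d
        (by positivity)]
      simp only [Int.toNat_natCast, hdrop]
      exact inner_eq x rest d
    rw [hinner]
    rw [ih (k+1) _ hdrop]
    rfl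

/-- B's emit loop equals `dupRec`, under the seen-set invariants. -/
lemma b_loop_eq (xs : List Int) :
    ∀ (l pre : List Int) (s : PySem.Set Int) (r : List Int),
      xs = pre ++ l →
      (∀ v : Int, v ∈ s ↔ (v ∈ pre ∧ 1 < List.count v xs)) →
      (∀ v : Int, v ∈ s ↔ v ∈ r) →
      (l.foldl
        (fun (p : PySem.Set Int × List Int) item =>
          if 1 < ((List.count item xs : Nat) : Int) && !(PySem.Set.contains p.1 item)
          then (PySem.Set.add p.1 item, p.2 ++ [item]) else p)
        (s, r)).2
      = dupRec r l := by
  intro l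
  induction l with
  | nil => intro pre s r _ _ _; simp [dupRec]
  | cons x rest ih =>
    intro pre s r hsplit hinv1 hinv2
    have hcount : (1 < List.count x xs) ↔ (x ∈ pre ∨ x ∈ rest) := by
      subst hsplit
      rw [List.count_append, List.count_cons_self, ← List.count_pos_iff,
        ← List.count_pos_iff]
      omega
    have hsx : PySem.Set.contains s x = true ↔ x ∈ s := by
      simp [PySem.Set.contains]
    have hcond : (1 < ((List.count x xs : Nat) : Int) && !(PySem.Set.contains s x)) = true
        ↔ (x ∈ rest ∧ ¬ x ∈ r) := by
      simp only [Bool.and_eq_true, Bool.not_eq_true', ← Bool.not_eq_true, hsx,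
        decide_eq_true_eq]
      rw [show ((1 : Int) < ((List.count x xs : Nat) : Int)) ↔ 1 < List.count x xs by
        exact_mod_cast Iff.rfl]
      rw [hcount, hinv1, ← hinv2, hinv1, hcount]
      tauto
    simp only [List.foldl_cons]
    by_cases hc : x ∈ rest ∧ ¬ x ∈ r
    · rw [if_pos (hcond.mpr hc)]
      have hmem : ∀ v : Int, v ∈ PySem.Set.add s x ↔ v ∈ s ∨ v = x :=
        fun v => PySem.Set.mem_add s x v
      rw [ih (pre ++ [x]) (PySem.Set.add s x) (r ++ [x])
        (by simp [hsplit])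
        (by
          intro v
          rw [hmem v]
          by_cases hvx : v = x
          · subst hvx
            simp [hinv1, hcount]
            tauto
          · simp [hinv1, hvx])
        (by intro v; rw [hmem v, hinv2]; simp)]
      simp [dupRec, hc]
    · rw [if_neg (by simp only [hcond]; exact hc)]
      have hns : ¬ (1 < List.count x xs ∧ ¬ x ∈ s) := by
        intro ⟨h1, h2⟩
        apply hc
        constructor
        · rcases hcount.mp h1 with hp | hr
          · exact absurd (hinv1 x |>.mpr ⟨hp, h1⟩) h2
          · exact hr
        · rw [← hinv2]; exact h2
      rw [ih (pre ++ [x]) s r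
        (by simp [hsplit])
        (by
          intro v
          by_cases hvx : v = x
          · subst hvx
            simp only [List.mem_append, List.mem_singleton, or_true, true_and]
            constructor
            · intro hv; exact (hinv1 v |>.mp hv).2
            · intro h1; by_contra hns'; exact hns ⟨h1, hns'⟩
          · simp [hinv1, hvx])
        hinv2]
      simp [dupRec, hc]

-- ===== VERDICT (by name: the statement is the Claim_ definition above) =====
theorem slow_version_spec : Claim_equal_slow_version := by
  intro xs _
  show slow_version xs = slow_version_alt xs
  have hA : slow_version xs = dupRec [] xs := by
    unfold slow_version
    exact outer_eq xs xs 0 [] (by simp)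
  have hB : slow_version_alt xs = dupRec [] xs := by
    unfold slow_version_alt
    have hcounter : xs.foldl (fun d item => d.modify item 0 (fun c => c + 1)) PySem.Dict.empty
        = PySem.Dict.counter xs := rfl
    simp only [hcounter, PySem.Dict.getD_counter]
    exact b_loop_eq xs xs [] [] []
      (by simp) (by simp) (by simp)
  rw [hA, hB]
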